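-- pv_equiv track=rewrite | github.com/TheOther-Guy/FIG-D-H | pending_offs.py | _is_pending_off_sheet
-- ===== SOURCE A (Python) =====
-- PENDING_OFF_PREFERRED_SHEETS = [
--     "pending off",
--     "pending_off",
--     "pending offs",
--     "pending offs credits",
--     "pending off credits",
--     "pending off credit",
--     "pending",
--     "pending off sheet",
-- ]
--
-- def _normalize(name: str) -> str:
--     """Normalize sheet names for comparison."""
--     return str(name).strip().lower().replace(" ", "_")
--
-- def _is_pending_off_sheet(sheet_name: str) -> bool:
--     """Returns True if sheet name resembles Pending Off sheet."""
--     norm = _normalize(sheet_name)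
--
--     # Preferred direct match
--     for pref in PENDING_OFF_PREFERRED_SHEETS:
--         if pref in norm:
--             return True
--
--     # heuristic: contains both "pending" and "off"
--     if "pending" in norm and "off" in norm:
--         return True
--
--     return False
-- ===== SOURCE B (Python) =====
-- def _normalize(name: str) -> str:
--     """Normalize sheet names for comparison."""
--     return str(name).strip().lower().replace(" ", "_")
--
-- def _is_pending_off_sheet(sheet_name: str) -> bool:
--     """Returns True if sheet name resembles Pending Off sheet.
--
--     After _normalize no spaces remain, so every spaced preferred entry is
--     dead and the rest (plus the 'pending'+'off' heuristic) reduce to one test.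
--     """
--     return "pending" in _normalize(sheet_name)
-- ===== Notes on version B (the rewrite author's own statement) =====
-- stated objective: simpler
-- what changed: Replaced the scan over the 8-entry preferred list plus the two-word heuristic with a single substring membership test on the normalized name, justified by the fact that normalization removes spaces so every spaced entry and the heuristic branch are dead and every live entry contains the one live keyword.
import Mathlib
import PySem

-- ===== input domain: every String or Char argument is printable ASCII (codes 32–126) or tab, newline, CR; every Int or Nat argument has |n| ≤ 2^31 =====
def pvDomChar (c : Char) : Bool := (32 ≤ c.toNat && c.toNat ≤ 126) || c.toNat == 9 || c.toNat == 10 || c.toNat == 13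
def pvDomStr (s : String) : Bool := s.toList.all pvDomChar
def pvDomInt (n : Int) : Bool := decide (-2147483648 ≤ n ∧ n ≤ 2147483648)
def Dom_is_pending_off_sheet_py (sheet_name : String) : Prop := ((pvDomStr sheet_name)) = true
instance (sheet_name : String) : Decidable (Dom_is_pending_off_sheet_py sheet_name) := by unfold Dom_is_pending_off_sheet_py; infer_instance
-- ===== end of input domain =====

-- B replaces A's scan over the constant preferred list plus the 'pending'+'off'
-- heuristic with a single substring test, since normalization leaves no spaces.


-- ===== PORT A =====
def PENDING_OFF_PREFERRED_SHEETS : List String :=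
  [ "pending off", "pending_off", "pending offs", "pending offs credits",
    "pending off credits", "pending off credit", "pending", "pending off sheet" ]

-- _normalize: str(name).strip().lower().replace(" ", "_")  (shared helper of A and B)
def pvNormalize (name : String) : String :=
  PySem.Str.replace (PySem.Str.lower (PySem.Str.strip name)) " " "_"

def is_pending_off_sheet_py (sheet_name : String) : Bool :=
  let norm := pvNormalize sheet_name
  -- for pref in …: if pref in norm: return True
  if PENDING_OFF_PREFERRED_SHEETS.any (fun pref => PySem.Str.isIn pref norm) then true
  -- heuristic: contains both "pending" and "off"
  else if PySem.Str.isIn "pending" norm && PySem.Str.isIn "off" norm then true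
  else false

-- ===== PORT B =====
def is_pending_off_sheet_py_alt (sheet_name : String) : Bool :=
  PySem.Str.isIn "pending" (pvNormalize sheet_name)

-- ===== PRECONDITION & SPEC =====
def Spec_is_pending_off_sheet_py (sheet_name : String) (out : Bool) : Prop := out = is_pending_off_sheet_py_alt sheet_name
instance (sheet_name : String) (out : Bool) : Decidable (Spec_is_pending_off_sheet_py sheet_name out) := by unfold Spec_is_pending_off_sheet_py; infer_instance

-- ===== CLAIM (what is proved, stated in full; the proofs are below) =====
def Claim_equal_is_pending_off_sheet_py : Prop := ∀ (sheet_name : String), Dom_is_pending_off_sheet_py sheet_name → Spec_is_pending_off_sheet_py sheet_name (is_pending_off_sheet_py sheet_name)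

-- ===== LEMMAS AND PROOFS =====

-- replace.go with old = " " never leaves a space in its output (given enough fuel
-- and a space-free accumulator): each step either substitutes '_' or keeps a non-space char.
lemma space_notin_replace_go : ∀ (fuel : Nat) (l acc : List Char),
    l.length ≤ fuel → ' ' ∉ acc → ' ' ∉ PySem.Chars.replace.go [' '] ['_'] fuel l acc := by
  intro fuel
  induction fuel with
  | zero =>
    intro l acc hlen hacc
    have hl : l = [] := List.eq_nil_of_length_eq_zero (Nat.le_zero.mp hlen)
    subst hl
    simp [PySem.Chars.replace.go, hacc]
  | succ n ih =>
    intro l acc hlen hacc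
    cases l with
    | nil => simp [PySem.Chars.replace.go, hacc]
    | cons c t =>
      by_cases hpre : List.isPrefixOf [' '] (c :: t) = true
      · have hrw : PySem.Chars.replace.go [' '] ['_'] (n+1) (c :: t) acc
            = PySem.Chars.replace.go [' '] ['_'] n (List.drop 1 (c :: t)) ('_' :: acc) := by
          simp [PySem.Chars.replace.go, hpre]
        rw [hrw]
        apply ih
        · simpa using Nat.le_of_succ_le_succ hlen
        · intro h
          rcases List.mem_cons.mp h with h | h
          · exact absurd h (by decide)
          · exact hacc h
      · have hrw : PySem.Chars.replace.go [' '] ['_'] (n+1) (c :: t) acc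
            = PySem.Chars.replace.go [' '] ['_'] n t (c :: acc) := by
          simp [PySem.Chars.replace.go, hpre]
        rw [hrw]
        apply ih
        · simpa using Nat.le_of_succ_le_succ hlen
        · intro h
          rcases List.mem_cons.mp h with h | h
          · subst h
            apply hpre
            simp [List.isPrefixOf]
          · exact hacc h

lemma space_notin_replace (s : List Char) : ' ' ∉ PySem.Chars.replace s [' '] ['_'] := by
  simpa [PySem.Chars.replace] using space_notin_replace_go s.length s [] le_rfl (by simp)

lemma space_notin_norm (s : String) : ' ' ∉ (pvNormalize s).toList := by
  simpa [pvNormalize, PySem.Str.toList_replace] using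
    space_notin_replace (PySem.Str.lower (PySem.Str.strip s)).toList

-- every preferred entry either contains a space (dead after normalization)
-- or starts with "pending"
lemma entry_key : ∀ p ∈ PENDING_OFF_PREFERRED_SHEETS,
    (' ' ∈ p.toList) ∨ ("pending".toList <+: p.toList) := by decide

lemma any_iff_pending (s : String) :
    PENDING_OFF_PREFERRED_SHEETS.any (fun pref => PySem.Str.isIn pref (pvNormalize s))
      = PySem.Str.isIn "pending" (pvNormalize s) := by
  by_cases hp : PySem.Str.isIn "pending" (pvNormalize s) = true
  · rw [hp, List.any_eq_true]
    exact ⟨"pending", by decide, hp⟩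
  · rw [Bool.eq_false_iff.mpr hp, List.any_eq_false]
    intro pref hmem hin
    have hinf : pref.toList <:+: (pvNormalize s).toList := (PySem.Str.isIn_iff_infix _ _).mp hin
    rcases entry_key pref hmem with hsp | hpre
    · exact space_notin_norm s (hinf.subset hsp)
    · exact hp ((PySem.Str.isIn_iff_infix _ _).mpr (hpre.isInfix.trans hinf))

-- ===== VERDICT (by name: the statement is the Claim_ definition above) =====
theorem is_pending_off_sheet_py_spec : Claim_equal_is_pending_off_sheet_py := by
  intro s _
  show is_pending_off_sheet_py s = is_pending_off_sheet_py_alt s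
  unfold is_pending_off_sheet_py is_pending_off_sheet_py_alt
  show (if (PENDING_OFF_PREFERRED_SHEETS.any fun pref => PySem.Str.isIn pref (pvNormalize s)) = true
        then true
        else if (PySem.Str.isIn "pending" (pvNormalize s) && PySem.Str.isIn "off" (pvNormalize s)) = true
        then true else false)
      = PySem.Str.isIn "pending" (pvNormalize s)
  rw [any_iff_pending]
  cases hp : PySem.Str.isIn "pending" (pvNormalize s) <;> simp
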